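-- pv_equiv track=rewrite | github.com/tracy9604/leetcode_python | sorting/common.py | find_4_sum
-- ===== SOURCE A (Python) =====
-- def find_4_sum(nums: list[int], target: int) -> list[list[int]]:
--     if len(nums) < 4:
--         return []
--
--     nums.sort()
--
--     quadruplets = []
--     for i in range(0, len(nums) - 3):
--         if i > 0 and nums[i] == nums[i - 1]:
--             continue
--         tmp_target = target - nums[i]
--         for j in range(i + 1, len(nums) - 2):
--             if j > i + 1 and nums[j] == nums[j - 1]:
--                 continue
--             left, right = j + 1, len(nums) - 1
--             while left < right:
--                 curr_sum = nums[j] + nums[left] + nums[right]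
--                 if curr_sum == tmp_target:
--                     quadruplets.append([nums[i], nums[j], nums[left], nums[right]])
--                     left += 1
--                     right -= 1
--                     while left < right and nums[left] == nums[left - 1]:
--                         left += 1
--                     while left < right and nums[right] == nums[right - 1]:
--                         right -= 1
--                 elif curr_sum < tmp_target:
--                     left += 1
--                 else:
--                     right -= 1
--
--     return quadruplets
-- ===== SOURCE B (Python) =====
-- # Same task as A, but decomposed as a recursive kSum(start, k, target) helper
-- # (two-pointer base case for k == 2) instead of A's hard-coded nested i/j loops.
-- # Like A, it sorts nums in place; the equivalence claimed is about the return value.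
-- def find_4_sum(nums: list[int], target: int) -> list[list[int]]:
--     if len(nums) < 4:
--         return []
--     nums.sort()
--
--     def kSum(start: int, k: int, t: int) -> list[list[int]]:
--         # only ever called with k >= 2
--         if k == 2:
--             pairs = []
--             left, right = start, len(nums) - 1
--             while left < right:
--                 s = nums[left] + nums[right]
--                 if s == t:
--                     pairs.append([nums[left], nums[right]])
--                     left += 1
--                     right -= 1
--                     while left < right and nums[left] == nums[left - 1]:
--                         left += 1
--                     while left < right and nums[right] == nums[right - 1]:
--                         right -= 1
--                 elif s < t:
--                     left += 1
--                 else: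
--                     right -= 1
--             return pairs
--         res = []
--         for i in range(start, len(nums) - k + 1):
--             if i > start and nums[i] == nums[i - 1]:
--                 continue
--             res += [[nums[i]] + q for q in kSum(i + 1, k - 1, t - nums[i])]
--         return res
--
--     return kSum(0, 4, target)
-- ===== Notes on version B (the rewrite author's own statement) =====
-- stated objective: alternative
-- what changed: Replaced A's hard-coded nested i/j loops plus inline two-pointer scan with a recursive kSum(start, k, target) helper that handles k==2 with the two-pointer scan and reduces k>2 by prepending nums[i] to each (k-1)-tuple.
import Mathlib
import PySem

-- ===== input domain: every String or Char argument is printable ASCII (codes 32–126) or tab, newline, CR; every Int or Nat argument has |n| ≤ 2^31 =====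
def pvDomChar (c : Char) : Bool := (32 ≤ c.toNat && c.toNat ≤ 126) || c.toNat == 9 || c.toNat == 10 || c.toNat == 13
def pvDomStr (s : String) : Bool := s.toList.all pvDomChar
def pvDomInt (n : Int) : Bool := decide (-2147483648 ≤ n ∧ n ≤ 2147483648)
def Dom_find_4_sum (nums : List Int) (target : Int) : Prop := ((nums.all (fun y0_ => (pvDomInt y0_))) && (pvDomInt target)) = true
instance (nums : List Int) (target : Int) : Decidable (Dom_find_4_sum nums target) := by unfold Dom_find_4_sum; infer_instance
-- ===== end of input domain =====

-- B rewrites A's hard-coded nested i/j loops as a recursive kSum(start,k,target) helper (same two-pointer base case);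
-- in Python both A and B sort nums in place — the equivalence claimed here is about the return value.
-- The while-loops are ported with an explicit fuel = (right - left).toNat, which bounds their iteration count exactly,
-- so the ports are exact; the loop exits on ¬ left < right before fuel runs out.

-- ===== PORT A =====
-- nums[k] with k always in range while the loops run; pyGetD is exact there
def pvGet (s : List Int) (k : Int) : Int := PySem.List.pyGetD s k 0

-- 'while left < right and nums[left] == nums[left-1]: left += 1'  (shared verbatim by both Pythons)
def pvSkipL (s : List Int) (fuel : Nat) (left right : Int) : Int :=
  match fuel with
  | 0 => left
  | fuel + 1 =>
    if left < right ∧ pvGet s left = pvGet s (left - 1) then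
      pvSkipL s fuel (left + 1) right
    else left

-- 'while left < right and nums[right] == nums[right-1]: right -= 1'  (shared verbatim by both Pythons)
def pvSkipR (s : List Int) (fuel : Nat) (left right : Int) : Int :=
  match fuel with
  | 0 => right
  | fuel + 1 =>
    if left < right ∧ pvGet s right = pvGet s (right - 1) then
      pvSkipR s fuel left (right - 1)
    else right

-- A's inner 'while left < right' two-pointer loop, appending quadruplets to the accumulator
def pvTwoPtrA (s : List Int) (fuel : Nat) (si sj tmp left right : Int) (acc : List (List Int)) :
    List (List Int) :=
  match fuel with
  | 0 => acc
  | fuel + 1 =>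
    if left < right then
      let cs := sj + pvGet s left + pvGet s right
      if cs = tmp then
        let l1 := pvSkipL s ((right - 1 - (left + 1)).toNat) (left + 1) (right - 1)
        let r1 := pvSkipR s ((right - 1 - l1).toNat) l1 (right - 1)
        pvTwoPtrA s fuel si sj tmp l1 r1 (acc ++ [[si, sj, pvGet s left, pvGet s right]])
      else if cs < tmp then
        pvTwoPtrA s fuel si sj tmp (left + 1) right acc
      else
        pvTwoPtrA s fuel si sj tmp left (right - 1) acc
    else acc

def find_4_sum (nums : List Int) (target : Int) : List (List Int) :=
  if nums.length < 4 then []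
  else
    let s := PySem.List.sorted nums (fun x => x) false
    let n : Int := s.length
    (PySem.List.pyRange 0 (n - 3) 1).foldl
      (fun quads i =>
        if 0 < i ∧ pvGet s i = pvGet s (i - 1) then quads
        else
          let tmp := target - pvGet s i
          (PySem.List.pyRange (i + 1) (n - 2) 1).foldl
            (fun quads2 j =>
              if i + 1 < j ∧ pvGet s j = pvGet s (j - 1) then quads2
              else pvTwoPtrA s ((n - 1 - (j + 1)).toNat) (pvGet s i) (pvGet s j) tmp (j + 1) (n - 1) quads2)
            quads)
      []

-- ===== PORT B =====
-- B's k == 2 base case: the two-pointer scan collecting pairs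
def pvTwoPtrB (s : List Int) (fuel : Nat) (t left right : Int) (pairs : List (List Int)) :
    List (List Int) :=
  match fuel with
  | 0 => pairs
  | fuel + 1 =>
    if left < right then
      let cs := pvGet s left + pvGet s right
      if cs = t then
        let l1 := pvSkipL s ((right - 1 - (left + 1)).toNat) (left + 1) (right - 1)
        let r1 := pvSkipR s ((right - 1 - l1).toNat) l1 (right - 1)
        pvTwoPtrB s fuel t l1 r1 (pairs ++ [[pvGet s left, pvGet s right]])
      else if cs < t then
        pvTwoPtrB s fuel t (left + 1) right pairs
      else
        pvTwoPtrB s fuel t left (right - 1) pairs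
    else pairs

-- B's recursive kSum(start, k, t); only ever invoked with k ≥ 2, the 0/1 cases are unreachable
def pvKSum (s : List Int) (k : Nat) (start t : Int) : List (List Int) :=
  match k with
  | 0 => []
  | 1 => []
  | 2 => pvTwoPtrB s (((s.length : Int) - 1 - start).toNat) t start ((s.length : Int) - 1) []
  | (m + 3) =>
    (PySem.List.pyRange start ((s.length : Int) - ((m : Int) + 3) + 1) 1).foldl
      (fun res i =>
        if start < i ∧ pvGet s i = pvGet s (i - 1) then res
        else res ++ (pvKSum s (m + 2) (i + 1) (t - pvGet s i)).map (fun q => pvGet s i :: q))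
      []

def find_4_sum_alt (nums : List Int) (target : Int) : List (List Int) :=
  if nums.length < 4 then []
  else pvKSum (PySem.List.sorted nums (fun x => x) false) 4 0 target

-- ===== PRECONDITION & SPEC =====
def Spec_find_4_sum (nums : List Int) (target : Int) (out : List (List Int)) : Prop := out = find_4_sum_alt nums target
instance (nums : List Int) (target : Int) (out : List (List Int)) : Decidable (Spec_find_4_sum nums target out) := by unfold Spec_find_4_sum; infer_instance

-- ===== CLAIM (what is proved, stated in full; the proofs are below) =====
def Claim_equal_find_4_sum : Prop := ∀ (nums : List Int) (target : Int), Dom_find_4_sum nums target → Spec_find_4_sum nums target (find_4_sum nums target)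

-- ===== LEMMAS AND PROOFS =====

-- accumulator extraction for pvTwoPtrB
theorem pvTwoPtrB_shift (s : List Int) (t : Int) :
    ∀ (fuel : Nat) (l r : Int),
      ∀ acc, pvTwoPtrB s fuel t l r acc = acc ++ pvTwoPtrB s fuel t l r [] := by
  intro fuel
  induction fuel with
  | zero => intro l r acc; simp [pvTwoPtrB]
  | succ n ih =>
    intro l r acc
    by_cases h : l < r
    · by_cases heq : pvGet s l + pvGet s r = t
      · rw [pvTwoPtrB, pvTwoPtrB]
        simp only [if_pos h, heq, if_pos]
        rw [ih _ _ (acc ++ [[pvGet s l, pvGet s r]]), ih _ _ ([] ++ [[pvGet s l, pvGet s r]])]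
        simp
      · by_cases hlt : pvGet s l + pvGet s r < t
        · rw [pvTwoPtrB, pvTwoPtrB]
          simp only [if_pos h, if_neg heq, if_pos hlt]
          exact ih _ _ acc
        · rw [pvTwoPtrB, pvTwoPtrB]
          simp only [if_pos h, if_neg heq, if_neg hlt]
          exact ih _ _ acc
    · rw [pvTwoPtrB, pvTwoPtrB]; simp [h]

-- A's two-pointer loop = acc ++ (si :: sj ::) each pair found by B's two-pointer loop
theorem pvTwoPtrA_eq (s : List Int) (si sj tmp : Int) :
    ∀ (fuel : Nat) (l r : Int),
      ∀ acc, pvTwoPtrA s fuel si sj tmp l r acc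
        = acc ++ (pvTwoPtrB s fuel (tmp - sj) l r []).map (fun p => si :: sj :: p) := by
  intro fuel
  induction fuel with
  | zero => intro l r acc; simp [pvTwoPtrA, pvTwoPtrB]
  | succ n ih =>
    intro l r acc
    by_cases h : l < r
    · by_cases heq : sj + pvGet s l + pvGet s r = tmp
      · have heqB : pvGet s l + pvGet s r = tmp - sj := by omega
        rw [pvTwoPtrA, pvTwoPtrB]
        simp only [if_pos h, heq, if_pos, heqB]
        rw [ih, pvTwoPtrB_shift s (tmp - sj) n _ _ ([] ++ [[pvGet s l, pvGet s r]])]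
        simp
      · have hneB : pvGet s l + pvGet s r ≠ tmp - sj := by omega
        by_cases hlt : sj + pvGet s l + pvGet s r < tmp
        · have hltB : pvGet s l + pvGet s r < tmp - sj := by omega
          rw [pvTwoPtrA, pvTwoPtrB]
          simp only [if_pos h, if_neg heq, if_pos hlt, if_neg hneB, if_pos hltB]
          exact ih _ _ acc
        · have hgtB : ¬ pvGet s l + pvGet s r < tmp - sj := by omega
          rw [pvTwoPtrA, pvTwoPtrB]
          simp only [if_pos h, if_neg heq, if_neg hlt, if_neg hneB, if_neg hgtB]
          exact ih _ _ acc
    · rw [pvTwoPtrA, pvTwoPtrB]; simp [h]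

-- generic: foldl of a skip-or-append step extracts its initial accumulator
theorem foldl_init_extract {α β : Type} (L : List α) (step : List β → α → List β)
    (hstep : ∀ a j, step a j = a ++ step [] j) :
    ∀ init, L.foldl step init = init ++ L.foldl step [] := by
  induction L with
  | nil => intro init; simp
  | cons a L ih =>
    intro init
    simp only [List.foldl_cons]
    rw [hstep init a, ih (init ++ step [] a), ih (step [] a), List.append_assoc]

-- A's inner j-loop over any index list = acc ++ (nums[i] ::) each triple found by B's kSum with k = 3
theorem inner_gen (s : List Int) (target i : Int) (L : List Int) :
    ∀ acc,
      L.foldl (fun q2 j =>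
        if i + 1 < j ∧ pvGet s j = pvGet s (j - 1) then q2
        else pvTwoPtrA s (((s.length : Int) - 1 - (j + 1)).toNat) (pvGet s i) (pvGet s j)
              (target - pvGet s i) (j + 1) ((s.length : Int) - 1) q2) acc
      = acc ++ (L.foldl (fun res j =>
          if i + 1 < j ∧ pvGet s j = pvGet s (j - 1) then res
          else res ++ (pvKSum s 2 (j + 1) ((target - pvGet s i) - pvGet s j)).map
                (fun q => pvGet s j :: q)) []).map (fun q => pvGet s i :: q) := by
  induction L with
  | nil => intro acc; simp
  | cons j L ih =>
    intro acc
    simp only [List.foldl_cons]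
    by_cases d : i + 1 < j ∧ pvGet s j = pvGet s (j - 1)
    · rw [if_pos d, if_pos d]; exact ih acc
    · rw [if_neg d, if_neg d]
      rw [pvTwoPtrA_eq s (pvGet s i) (pvGet s j) (target - pvGet s i)
            (((s.length : Int) - 1 - (j + 1)).toNat) (j + 1) ((s.length : Int) - 1) acc]
      rw [ih]
      rw [foldl_init_extract _ _ (by intro a j'; split <;> simp)
            ([] ++ (pvKSum s 2 (j + 1) ((target - pvGet s i) - pvGet s j)).map
              (fun q => pvGet s j :: q))]
      simp only [pvKSum, List.nil_append, List.map_append, List.map_map, List.append_assoc]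
      rfl

-- ===== VERDICT (by name: the statement is the Claim_ definition above) =====
theorem find_4_sum_spec : Claim_equal_find_4_sum := by
  unfold Claim_equal_find_4_sum Spec_find_4_sum
  intro nums target _
  by_cases hn : nums.length < 4
  · simp [find_4_sum, find_4_sum_alt, hn]
  · simp only [find_4_sum, find_4_sum_alt, if_neg hn]
    set s := PySem.List.sorted nums (fun x => x) false with hs
    set n : Int := (s.length : Int) with hnn
    have hk4 : pvKSum s 4 0 target
        = (PySem.List.pyRange 0 (n - 3) 1).foldl
            (fun res i =>
              if 0 < i ∧ pvGet s i = pvGet s (i - 1) then res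
              else res ++ (pvKSum s 3 (i + 1) (target - pvGet s i)).map
                    (fun q => pvGet s i :: q)) [] := by
      show pvKSum s (1 + 3) 0 target = _
      rw [pvKSum]
      norm_num
      have : n - 4 + 1 = n - 3 := by ring
      rw [this]
    rw [hk4]
    have hstep : (fun (quads : List (List Int)) (i : Int) =>
        if 0 < i ∧ pvGet s i = pvGet s (i - 1) then quads
        else (PySem.List.pyRange (i + 1) (n - 2) 1).foldl
              (fun quads2 j =>
                if i + 1 < j ∧ pvGet s j = pvGet s (j - 1) then quads2
                else pvTwoPtrA s ((n - 1 - (j + 1)).toNat) (pvGet s i) (pvGet s j)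
                      (target - pvGet s i) (j + 1) (n - 1) quads2)
              quads)
        = (fun (res : List (List Int)) (i : Int) =>
            if 0 < i ∧ pvGet s i = pvGet s (i - 1) then res
            else res ++ (pvKSum s 3 (i + 1) (target - pvGet s i)).map (fun q => pvGet s i :: q)) := by
      funext quads i
      by_cases d : 0 < i ∧ pvGet s i = pvGet s (i - 1)
      · rw [if_pos d, if_pos d]
      · rw [if_neg d, if_neg d]
        rw [inner_gen s target i (PySem.List.pyRange (i + 1) (n - 2) 1) quads]
        have hk3 : pvKSum s 3 (i + 1) (target - pvGet s i)
            = (PySem.List.pyRange (i + 1) (n - 2) 1).foldl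
                (fun res j =>
                  if i + 1 < j ∧ pvGet s j = pvGet s (j - 1) then res
                  else res ++ (pvKSum s 2 (j + 1) ((target - pvGet s i) - pvGet s j)).map
                        (fun q => pvGet s j :: q)) [] := by
          show pvKSum s (0 + 3) (i + 1) (target - pvGet s i) = _
          rw [pvKSum]
          norm_num
          have : n - 3 + 1 = n - 2 := by ring
          rw [this]
        rw [hk3]
    rw [hstep]
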